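-- pv_equiv track=rewrite | github.com/mbjackson-capp/everybodycodes | song/q3.py | part2
-- ===== SOURCE A (Python) =====
-- import heapq
-- from typing import List
--
-- def part2(data: List[int], n_crates=20):
--     """For the same reason, the solution to part 2 must be the twenty smallest unique integers.
--     Implemented using a priority queue for quick repeated extraction of smallest remaining create size.
--     """
--     data_uniq = list(set(data))
--     heapq.heapify(data_uniq)
--     total_wt = 0
--     for n in range(n_crates):
--         smallest_remaining_crate = heapq.heappop(data_uniq)
--         total_wt += smallest_remaining_crate
--     return total_wt
-- ===== SOURCE B (Python) =====
-- def part2(data, n_crates=20):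
--     """Sum of the n_crates smallest unique integers: sort the deduplicated
--     values once, then accumulate the first n_crates by index (indexing, like
--     A's heappop on an exhausted heap, raises IndexError when there are fewer
--     unique values than n_crates)."""
--     data_uniq = sorted(set(data))
--     total_wt = 0
--     for i in range(n_crates):
--         total_wt += data_uniq[i]
--     return total_wt
-- ===== Notes on version B (the rewrite author's own statement) =====
-- stated objective: simpler
-- what changed: Replaces the heapify + repeated-heappop extraction loop with sorted(set(data)) followed by an indexed prefix accumulation over the first n_crates entries.
import Mathlib
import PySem

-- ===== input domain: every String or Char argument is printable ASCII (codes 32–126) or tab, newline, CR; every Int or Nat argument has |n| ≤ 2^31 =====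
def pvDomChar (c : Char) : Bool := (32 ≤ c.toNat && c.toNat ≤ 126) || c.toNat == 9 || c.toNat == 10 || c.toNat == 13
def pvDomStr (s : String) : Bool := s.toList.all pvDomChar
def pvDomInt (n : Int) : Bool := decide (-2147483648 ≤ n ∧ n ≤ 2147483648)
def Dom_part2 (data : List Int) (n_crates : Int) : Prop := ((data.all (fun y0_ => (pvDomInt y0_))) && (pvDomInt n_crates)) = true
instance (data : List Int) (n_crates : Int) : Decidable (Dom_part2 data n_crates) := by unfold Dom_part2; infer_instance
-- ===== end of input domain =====

-- B replaces A's heapify + repeated-heappop min-extraction with sorted(set(data)) and an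
-- indexed prefix accumulation; objective: simpler, same result on all inputs where A returns.


-- ===== PORT A =====
-- heappop on the heapified list extracts the minimum remaining element; the states kept are
-- (remaining elements, running total).  On an empty heap Python raises (min? = none): those
-- inputs are excluded by Pre_part2, the port just keeps the state there.
def heapStep (st : List Int × Int) : List Int × Int :=
  match PySem.List.min? st.1 (fun x => x) with
  | some m => (st.1.erase m, st.2 + m)
  | none => st

def part2 (data : List Int) (n_crates : Int) : Int :=
  let data_uniq : List Int := PySem.Set.ofList data
  ((PySem.List.pyRange 0 n_crates 1).foldl (fun st _ => heapStep st) (data_uniq, 0)).2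

-- ===== PORT B =====
-- data_uniq[i] raises IndexError where pyGetD's default would be used; exactly those inputs
-- are excluded by Pre_part2, so the port is exact on Pre_.
def part2_alt (data : List Int) (n_crates : Int) : Int :=
  let data_uniq := PySem.List.sorted (PySem.Set.ofList data) (fun x => x) false
  (PySem.List.pyRange 0 n_crates 1).foldl
    (fun total_wt i => total_wt + PySem.List.pyGetD data_uniq i 0) 0

-- ===== PRECONDITION & SPEC =====
-- Pre_ excludes exactly the inputs with fewer distinct values than n_crates, on which A's
-- heappop (and B's indexing) raises IndexError.
def Pre_part2 (data : List Int) (n_crates : Int) : Prop :=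
  n_crates ≤ ((PySem.Set.ofList data).length : Int)
instance (data : List Int) (n_crates : Int) : Decidable (Pre_part2 data n_crates) := by
  unfold Pre_part2; infer_instance

def pvWitness_part2 : List Int × Int := ([5, 1, 1, 2, 3, 4], 3)

def Spec_part2 (data : List Int) (n_crates : Int) (out : Int) : Prop := out = part2_alt data n_crates
instance (data : List Int) (n_crates : Int) (out : Int) : Decidable (Spec_part2 data n_crates out) := by unfold Spec_part2; infer_instance

-- ===== CLAIM (what is proved, stated in full; the proofs are below) =====
def Claim_equal_part2 : Prop := ∀ (data : List Int) (n_crates : Int), Dom_part2 data n_crates → Pre_part2 data n_crates → Spec_part2 data n_crates (part2 data n_crates)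

-- ===== LEMMAS AND PROOFS =====

-- On a duplicate-free list, the sorted list is the minimum followed by the sorted remainder.
lemma sorted_min_cons (l : List Int) (hl : l.Nodup) (m : Int)
    (hm : PySem.List.min? l (fun x => x) = some m) :
    PySem.List.sorted l (fun x => x) false
      = m :: PySem.List.sorted (l.erase m) (fun x => x) false := by
  have hmem : m ∈ l := PySem.List.min?_mem hm
  apply PySem.List.sorted_eq_of_perm_of_pairwise_lt
  · exact ((PySem.List.sorted_perm _ _ _).cons m).trans (List.perm_cons_erase hmem).symm
  · constructor
    · intro y hy
      have hy' : y ∈ l.erase m := (PySem.List.mem_sorted _ _ _ _).1 hy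
      have hne : y ≠ m := ((List.Nodup.mem_erase_iff hl).1 hy').1
      exact lt_of_le_of_ne (PySem.List.min?_isMin hm y (List.mem_of_mem_erase hy')) (Ne.symm hne)
    · have h1 := PySem.List.sorted_pairwise (l.erase m) (fun x => x)
      have h2 : (PySem.List.sorted (l.erase m) (fun x => x) false).Nodup :=
        ((PySem.List.sorted_perm _ _ _).nodup_iff).2 (hl.erase m)
      exact (h1.and h2).imp (fun h => lt_of_le_of_ne h.1 h.2)

-- A's extraction loop sums the prefix of the sorted list, one minimum per iteration.
lemma heap_loop_eq (r : List Int) : ∀ (l : List Int) (acc : Int), l.Nodup → r.length ≤ l.length →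
    (r.foldl (fun st _ => heapStep st) (l, acc)).2
      = acc + ((PySem.List.sorted l (fun x => x) false).take r.length).sum := by
  induction r with
  | nil => intro l acc _ _; simp
  | cons x r ih =>
    intro l acc hnd hlen
    have hne : l ≠ [] := by
      intro h; subst h; simp at hlen
    obtain ⟨m, hm⟩ : ∃ m, PySem.List.min? l (fun x => x) = some m := by
      cases h : PySem.List.min? l (fun x => x) with
      | none => exact absurd ((PySem.List.min?_eq_none_iff _ _).1 h) hne
      | some m => exact ⟨m, rfl⟩
    have hmem : m ∈ l := PySem.List.min?_mem hm
    have hstep : heapStep (l, acc) = (l.erase m, acc + m) := by simp [heapStep, hm]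
    have hlen' : r.length ≤ (l.erase m).length := by
      have h1 := List.length_erase_of_mem hmem
      simp only [List.length_cons] at hlen
      omega
    rw [List.foldl_cons, hstep, ih (l.erase m) (acc + m) (hnd.erase m) hlen',
        sorted_min_cons l hnd m hm]
    simp [List.take_succ_cons]
    ring

-- B's indexed loop sums the same prefix.
lemma index_loop_eq (s : List Int) (n : Nat) : ∀ (acc : Int), n ≤ s.length →
    (PySem.List.pyRange 0 (n : Int) 1).foldl
        (fun total_wt i => total_wt + PySem.List.pyGetD s i 0) acc
      = acc + (s.take n).sum := by
  induction n with
  | zero =>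
    intro acc _
    simp [PySem.List.pyRange_one_eq_nil (le_refl (0 : Int))]
  | succ n ih =>
    intro acc h
    have hsplit : PySem.List.pyRange 0 ((n + 1 : Nat) : Int) 1
        = PySem.List.pyRange 0 (n : Int) 1 ++ [(n : Int)] := by
      have := PySem.List.pyRange_one_succ_right (a := 0) (b := (n : Int)) (by positivity)
      push_cast
      simpa using this
    have hn : n < s.length := by omega
    rw [hsplit, List.foldl_append, ih acc (by omega)]
    simp [PySem.List.pyGetD_natCast, List.sum_take_succ s n hn, List.getElem?_eq_getElem hn]
    ring

-- ===== VERDICT (by name: the statement is the Claim_ definition above) =====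
theorem part2_spec : Claim_equal_part2 := by
  intro data n_crates _ hpre
  unfold Spec_part2 part2 part2_alt
  by_cases hle : n_crates ≤ 0
  · simp [PySem.List.pyRange_one_eq_nil hle]
  · have hpos : 0 < n_crates := by omega
    have hlen : (PySem.List.pyRange 0 n_crates 1).length = n_crates.toNat := by
      simp [PySem.List.length_pyRange_one]
    have hnd : (PySem.Set.ofList data : List Int).Nodup := PySem.Set.nodup_ofList data
    have hle' : n_crates.toNat ≤ (PySem.Set.ofList data : List Int).length := by
      unfold Pre_part2 at hpre; omega
    have hA := heap_loop_eq (PySem.List.pyRange 0 n_crates 1)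
      (PySem.Set.ofList data) 0 hnd (by rw [hlen]; exact hle')
    have hsl : (PySem.List.sorted (PySem.Set.ofList data) (fun x => x) false).length
        = (PySem.Set.ofList data : List Int).length := PySem.List.length_sorted _ _ _
    have hB := index_loop_eq (PySem.List.sorted (PySem.Set.ofList data) (fun x => x) false)
      n_crates.toNat 0 (by rw [hsl]; exact hle')
    have hcast : ((n_crates.toNat : Int)) = n_crates := Int.toNat_of_nonneg (le_of_lt hpos)
    rw [hcast] at hB
    rw [hA, hB, hlen]
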